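-- pv_equiv track=rewrite | github.com/Anonymouskb17/python | b13.1.py | khonglapk
-- ===== SOURCE A (Python) =====
-- def khonglapk(string, k):
--     n = len(string)
--
--     # Tạo một tập hợp để lưu trữ các chuỗi con độ dài k
--     sub1 = set()
--
--     for i in range(n - k + 1):
--         sub_string = string[i:i+k]
--         if sub_string in sub1:
--             return False
--         sub1.add(sub_string)
--
--     return True
-- ===== SOURCE B (Python) =====
-- def khonglapk(string, k):
--     n = len(string)
--     subs = sorted(string[i:i+k] for i in range(n) if i + k <= n)
--     for a, b in zip(subs, subs[1:]):
--         if a == b: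
--             return False
--     return True
-- ===== Notes on version B (the rewrite author's own statement) =====
-- stated objective: alternative
-- what changed: Replaces the incremental hash-set membership loop with collecting the windows that fit in the string, sorting them, and scanning consecutive elements for an equal adjacent pair; Pre_ restricts to the natural domain k >= 1, since for non-positive k the corner is anybody's: A slides over n-k+1 empty windows while B takes the windows that fit, so their verdicts can differ on degenerate inputs.
-- outside the precondition, e.g. on khonglapk('', -5): A returns False, B returns True; on khonglapk('ab', 0): A returns False, B returns False
import Mathlib
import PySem

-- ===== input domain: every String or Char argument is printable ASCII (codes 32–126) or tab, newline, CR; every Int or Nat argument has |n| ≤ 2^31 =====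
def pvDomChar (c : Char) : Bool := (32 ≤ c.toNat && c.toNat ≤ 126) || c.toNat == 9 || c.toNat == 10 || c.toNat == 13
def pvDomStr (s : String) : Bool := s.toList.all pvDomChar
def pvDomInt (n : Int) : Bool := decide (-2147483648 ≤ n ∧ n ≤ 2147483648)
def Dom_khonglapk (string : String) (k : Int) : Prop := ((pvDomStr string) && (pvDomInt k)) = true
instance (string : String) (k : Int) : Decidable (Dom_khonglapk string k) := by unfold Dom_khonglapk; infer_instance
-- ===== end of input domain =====

-- B replaces A's incremental hash-set membership loop by sort-then-adjacent-compare duplicate detection (alternative algorithm, similar cost).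

-- ===== PORT A =====
-- the for-loop 'for i in range(n - k + 1)' (range is lazy: i counts up to the bound),
-- with early return False, carrying the set sub1
def khonglapkLoop (cs : List Char) (k stop i : Int) (sub1 : PySem.Set (List Char)) : Bool :=
  if i < stop then
    let subString := PySem.List.slice cs (some i) (some (i + k))
    if PySem.Set.contains sub1 subString then false
    else khonglapkLoop cs k stop (i + 1) (PySem.Set.add sub1 subString)
  else true
termination_by (stop - i).toNat
decreasing_by omega

def khonglapk (string : String) (k : Int) : Bool :=
  let cs := string.toList
  let n : Int := cs.length
  khonglapkLoop cs k (n - k + 1) 0 PySem.Set.empty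

-- ===== PORT B =====
-- scan of zip(subs, subs[1:]): False on an equal adjacent pair
def khonglapkAdj : List (List Char) → Bool
  | a :: b :: rest => if a = b then false else khonglapkAdj (b :: rest)
  | _ => true

def khonglapk_alt (string : String) (k : Int) : Bool :=
  let cs := string.toList
  let n : Int := cs.length
  let subs := PySem.List.sorted (((PySem.List.pyRange 0 n 1).filter (fun i => decide (i + k ≤ n))).map
    (fun i => PySem.List.slice cs (some i) (some (i + k)))) (fun x => x) false
  khonglapkAdj subs

-- ===== PRECONDITION & SPEC =====
-- Pre_ restricts to the task's natural domain, a positive substring length k >= 1: for k <= 0 the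
-- corner is anybody's — A slides over n-k+1 empty windows (False whenever there are two), while B
-- takes the windows that fit in the string (True when at most one fits); neither verdict is specified.
def Pre_khonglapk (string : String) (k : Int) : Prop := 1 ≤ k
instance (string : String) (k : Int) : Decidable (Pre_khonglapk string k) := by unfold Pre_khonglapk; infer_instance
def pvWitness_khonglapk : String × Int := ("abcab", 2)

def Spec_khonglapk (string : String) (k : Int) (out : Bool) : Prop := out = khonglapk_alt string k
instance (string : String) (k : Int) (out : Bool) : Decidable (Spec_khonglapk string k out) := by unfold Spec_khonglapk; infer_instance

-- ===== CLAIM (what is proved, stated in full; the proofs are below) =====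
def Claim_equal_khonglapk : Prop := ∀ (string : String) (k : Int), Dom_khonglapk string k → Pre_khonglapk string k → Spec_khonglapk string k (khonglapk string k)

-- ===== LEMMAS AND PROOFS =====

-- for 1 ≤ k, the start positions whose window fits are exactly range(n - k + 1)
theorem khonglapkFilterRange (n k : Int) (hn : 0 ≤ n) (hk : 1 ≤ k) :
    (PySem.List.pyRange 0 n 1).filter (fun i => decide (i + k ≤ n)) =
      PySem.List.pyRange 0 (n - k + 1) 1 := by
  by_cases hc : 0 ≤ n - k + 1
  · rw [PySem.List.pyRange_one_append 0 (n - k + 1) n hc (by omega), List.filter_append,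
      List.filter_eq_self.mpr ?_, List.filter_eq_nil_iff.mpr ?_, List.append_nil]
    · intro x hx
      have := PySem.List.mem_pyRange_one.mp hx
      simp only [decide_eq_true_eq]
      omega
    · intro x hx
      have := PySem.List.mem_pyRange_one.mp hx
      simp only [decide_eq_true_eq]
      omega
  · rw [show PySem.List.pyRange 0 (n - k + 1) 1 = [] from PySem.List.pyRange_one_eq_nil (by omega)]
    apply List.filter_eq_nil_iff.mpr
    intro x hx
    have := PySem.List.mem_pyRange_one.mp hx
    simp only [decide_eq_true_eq]
    omega

-- A's loop decides nodup of the accumulated set followed by the remaining substrings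
theorem khonglapkLoop_eq (cs : List Char) (k stop : Int) (i : Int)
    (sub1 : List (List Char)) (hs : sub1.Nodup) :
    khonglapkLoop cs k stop i sub1 =
      decide ((sub1 ++ (PySem.List.pyRange i stop 1).map
        (fun j => PySem.List.slice cs (some j) (some (j + k)))).Nodup) := by
  induction i, sub1 using khonglapkLoop.induct (cs := cs) (k := k) (stop := stop) with
  | case1 i sub1 hlt sub hc =>
    rw [khonglapkLoop, if_pos hlt, PySem.List.pyRange_one_cons hlt, List.map_cons]
    have hmem : PySem.List.slice cs (some i) (some (i + k)) ∈ sub1 := by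
      simpa [PySem.Set.contains] using hc
    rw [if_pos hc]
    have hnot : ¬ (sub1 ++ PySem.List.slice cs (some i) (some (i + k)) ::
        (PySem.List.pyRange (i + 1) stop 1).map
          (fun j => PySem.List.slice cs (some j) (some (j + k)))).Nodup := by
      intro h
      exact (List.disjoint_of_nodup_append h) hmem (by simp)
    simp [hnot]
  | case2 i sub1 hlt sub hc ih =>
    rw [khonglapkLoop, if_pos hlt, PySem.List.pyRange_one_cons hlt, List.map_cons]
    have hmem : PySem.List.slice cs (some i) (some (i + k)) ∉ sub1 := by
      simpa [PySem.Set.contains] using hc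
    rw [if_neg hc]
    have hadd : PySem.Set.add sub1 (PySem.List.slice cs (some i) (some (i + k)))
        = sub1 ++ [PySem.List.slice cs (some i) (some (i + k))] := by
      simp [PySem.Set.add, PySem.Set.contains, hmem]
    have hnd : (sub1 ++ [PySem.List.slice cs (some i) (some (i + k))]).Nodup := by
      simp [List.nodup_append, hs]
      intro a ha h
      exact hmem (h ▸ ha)
    rw [hadd] at ih
    rw [hadd, ih hnd, List.append_assoc, List.singleton_append]
  | case3 i sub1 hge =>
    rw [khonglapkLoop, if_neg hge, PySem.List.pyRange_one_eq_nil (by omega)]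
    simp [hs]

-- the two inferred instance paths for sorting List Char name the same function
theorem khonglapkSortedInst (l : List (List Char)) :
    PySem.List.sorted l (fun x => x) false =
      @PySem.List.sorted (List Char) (List Char) List.instLinearOrder.toLT
        LinearOrder.toDecidableLT l (fun x => x) false := by
  congr 1

-- adjacent ≤ and adjacent ≠ give adjacent <
theorem khonglapkChainLt (l : List (List Char)) :
    l.IsChain (fun a b => a ≤ b) → l.IsChain (fun a b => a ≠ b) →
      l.IsChain (fun a b => a < b) := by
  induction l with
  | nil => intro _ _; simp
  | cons a t ih =>
    cases t with
    | nil => intro _ _; simp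
    | cons b r =>
      intro h1 h2
      rw [List.isChain_cons_cons] at h1 h2 ⊢
      exact ⟨lt_of_le_of_ne h1.1 h2.1, ih h1.2 h2.2⟩

-- B's adjacent scan tests IsChain (· ≠ ·)
theorem khonglapkAdj_iff (l : List (List Char)) :
    khonglapkAdj l = true ↔ l.IsChain (fun a b => a ≠ b) := by
  induction l with
  | nil => simp [khonglapkAdj]
  | cons a t ih =>
    cases t with
    | nil => simp [khonglapkAdj]
    | cons b r =>
      by_cases hab : a = b
      · simp [khonglapkAdj, hab, List.isChain_cons_cons]
      · simp [khonglapkAdj, hab, ih, List.isChain_cons_cons]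

-- B returns true exactly on nodup substring lists
theorem khonglapkAdj_sorted_iff (l : List (List Char)) :
    khonglapkAdj (PySem.List.sorted l (fun x => x) false) = true ↔ l.Nodup := by
  rw [khonglapkAdj_iff]
  have hle : (PySem.List.sorted l (fun x => x) false).Pairwise (fun a b => a ≤ b) := by
    rw [khonglapkSortedInst]
    exact PySem.List.sorted_pairwise l (fun x => x)
  constructor
  · intro h
    have hlt := khonglapkChainLt _ hle.isChain h
    have hp := List.isChain_iff_pairwise.mp hlt
    exact ((PySem.List.sorted_perm l (fun x => x) false).nodup_iff).mp
      (hp.imp (fun hab => ne_of_lt hab))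
  · intro h
    exact (((PySem.List.sorted_perm l (fun x => x) false).nodup_iff).mpr h).isChain

-- ===== VERDICT (by name: the statement is the Claim_ definition above) =====
theorem khonglapk_spec : Claim_equal_khonglapk := by
  intro string k _ hk
  unfold Spec_khonglapk
  simp only [khonglapk, khonglapk_alt]
  rw [khonglapkFilterRange _ k (Int.natCast_nonneg _) hk]
  rw [khonglapkLoop_eq string.toList k _ 0 PySem.Set.empty (by simp [PySem.Set.empty])]
  simp only [PySem.Set.empty, List.nil_append]
  by_cases h : ((PySem.List.pyRange 0 ((string.toList.length : Int) - k + 1) 1).map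
      (fun i => PySem.List.slice string.toList (some i) (some (i + k)))).Nodup
  · rw [(khonglapkAdj_sorted_iff _).mpr h]
    exact decide_eq_true h
  · have hb : khonglapkAdj (PySem.List.sorted ((PySem.List.pyRange 0 ((string.toList.length : Int) - k + 1) 1).map
        (fun i => PySem.List.slice string.toList (some i) (some (i + k)))) (fun x => x) false) = false := by
      rw [← Bool.not_eq_true, khonglapkAdj_sorted_iff]
      exact h
    rw [hb]
    exact decide_eq_false h
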